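-- pv_equiv track=rewrite | github.com/theanik/CompetitiveProgramming | hackerrank/Leonardo's_Prime_Factors.py | maxPrimefactorNumProductGatterthenN
-- ===== SOURCE A (Python) =====
-- def sieve(n):
--     primeList = []
--
--     prime = [True for i in range(n + 1)] # boolen trure array
--     i = 2
--     while i*i < n:
--         if prime[i] == True:
--             for j in range(i*2, n + 1,i):
--                 prime[j] = False
--         i+=1
--     prime[0] = False
--     prime[1] = False
--     count = 0
--     for i in range(n + 1):
--         if prime[i]:
--             primeList.append(i)
--
--     return primeList;
--
-- def maxPrimefactorNumProductGatterthenN(n):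
--     if (n < 2):
--         return 0;
--     prod = 1;
--     count = 0;
--     prime = sieve(n); #[2, 3, 5, 7, 11, 13, 17, 19, 23, 29, 31, 37, 41, 43, 47]
--     for i in prime:
--         prod = prod * i
--         if prod <= n:
--             count = count + 1
--     return count;
-- ===== SOURCE B (Python) =====
-- def _is_prime(m):
--     d = 2
--     while d * d <= m:
--         if m % d == 0:
--             return False
--         d += 1
--     return True
--
-- def maxPrimefactorNumProductGatterthenN(n):
--     # Count how many of the smallest primes can be multiplied together
--     # while the running product stays <= n.  No sieve: scan candidates
--     # upward with trial division and stop as soon as the product exceeds n.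
--     if n < 2:
--         return 0
--     prod = 1
--     count = 0
--     for p in range(2, n + 1):
--         if _is_prime(p):
--             prod *= p
--             if prod > n:
--                 break
--             count += 1
--     return count
-- ===== Notes on version B (the rewrite author's own statement) =====
-- stated objective: faster
-- what changed: B drops A's full boolean Eratosthenes sieve over [0..n] and instead scans candidates upward with trial division, breaking as soon as the running prime product exceeds n, so only the few smallest primes are ever generated.
import Mathlib
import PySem

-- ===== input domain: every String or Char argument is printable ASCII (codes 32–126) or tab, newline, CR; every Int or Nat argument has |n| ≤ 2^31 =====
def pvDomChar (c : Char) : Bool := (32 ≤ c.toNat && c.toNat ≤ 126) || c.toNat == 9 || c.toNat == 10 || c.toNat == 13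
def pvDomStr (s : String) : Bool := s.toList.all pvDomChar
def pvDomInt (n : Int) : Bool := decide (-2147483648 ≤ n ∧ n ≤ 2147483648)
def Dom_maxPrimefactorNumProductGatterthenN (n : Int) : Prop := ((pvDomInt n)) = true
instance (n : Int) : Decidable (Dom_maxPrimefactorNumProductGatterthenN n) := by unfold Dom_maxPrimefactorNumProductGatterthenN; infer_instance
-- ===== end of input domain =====

-- B replaces A's full boolean sieve over [0..n] by trial-division candidate
-- scanning with an early break once the running product exceeds n (faster).

-- ===== PORT A =====
-- Python's boolean list `prime` is ported as a total table Nat → Bool; only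
-- indices 0..n are ever read or written by the Python code, so this is exact.

-- inner `for j in range(i*2, n+1, i): prime[j] = False` (the write index j is
-- always in range: j ≤ n < len(prime); the `0 < i` conjunct is a totality guard
-- that always holds at call sites, where i ≥ 2)
def pvMarkMultiples (N i : Nat) (pr : Array Bool) (j : Nat) : Array Bool :=
  if _h : 0 < i ∧ j ≤ N then
    pvMarkMultiples N i (pr.setIfInBounds j false) (j + i)
  else pr
  termination_by N + 1 - j
  decreasing_by omega

-- `while i*i < n: if prime[i] == True: mark; i += 1` (the read index i is
-- always in range: i < n < len(prime), so getD is exact)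
def pvSieveLoop (N : Nat) (pr : Array Bool) (i : Nat) : Array Bool :=
  if _h : i * i < N then
    pvSieveLoop N (if pr.getD i false = true then pvMarkMultiples N i pr (i * 2) else pr) (i + 1)
  else pr
  termination_by N - i
  decreasing_by
    rcases Nat.eq_zero_or_pos i with h0 | h0
    · subst h0; omega
    · have h1 : i ≤ i * i := Nat.le_mul_of_pos_left i h0
      omega

def pvSieve (N : Nat) : List Nat :=
  let pr := pvSieveLoop N (Array.replicate (N + 1) true) 2
  let pr2 := (pr.setIfInBounds 0 false).setIfInBounds 1 false
  (List.range (N + 1)).foldl (fun acc i => if pr2.getD i false = true then acc ++ [i] else acc) []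

def maxPrimefactorNumProductGatterthenN (n : Int) : Int :=
  if n < 2 then 0
  else
    ((pvSieve n.toNat).foldl
      (fun (pc : Int × Int) (i : Nat) =>
        (pc.1 * (i : Int), if pc.1 * (i : Int) ≤ n then pc.2 + 1 else pc.2))
      (1, 0)).2

-- ===== PORT B =====
-- `while d*d <= m: if m % d == 0: return False; d += 1`
def pvIsPrimeLoop (m d : Nat) : Bool :=
  if _h : d * d ≤ m then
    if m % d = 0 then false else pvIsPrimeLoop m (d + 1)
  else true
  termination_by m + 1 - d
  decreasing_by
    rcases Nat.eq_zero_or_pos d with h0 | h0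
    · subst h0; omega
    · have h1 : d ≤ d * d := Nat.le_mul_of_pos_left d h0
      omega

def pvIsPrime (m : Nat) : Bool := pvIsPrimeLoop m 2

-- `for p in range(2, n+1): if _is_prime(p): prod *= p; if prod > n: break; count += 1`
def pvBLoop (n : Int) (N p : Nat) (prod count : Int) : Int :=
  if _h : p ≤ N then
    if pvIsPrime p = true then
      if prod * (p : Int) > n then count
      else pvBLoop n N (p + 1) (prod * (p : Int)) (count + 1)
    else pvBLoop n N (p + 1) prod count
  else count
  termination_by N + 1 - p
  decreasing_by all_goals omega

def maxPrimefactorNumProductGatterthenN_alt (n : Int) : Int :=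
  if n < 2 then 0 else pvBLoop n n.toNat 2 1 0

-- ===== PRECONDITION & SPEC =====
def Spec_maxPrimefactorNumProductGatterthenN (n : Int) (out : Int) : Prop := out = maxPrimefactorNumProductGatterthenN_alt n
instance (n : Int) (out : Int) : Decidable (Spec_maxPrimefactorNumProductGatterthenN n out) := by unfold Spec_maxPrimefactorNumProductGatterthenN; infer_instance

-- ===== CLAIM (what is proved, stated in full; the proofs are below) =====
def Claim_equal_maxPrimefactorNumProductGatterthenN : Prop := ∀ (n : Int), Dom_maxPrimefactorNumProductGatterthenN n → Spec_maxPrimefactorNumProductGatterthenN n (maxPrimefactorNumProductGatterthenN n)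

-- ===== LEMMAS AND PROOFS =====

-- the common counting fold (syntactically A's final loop)
def pvCF (n : Int) (xs : List Nat) (pc : Int × Int) : Int × Int :=
  xs.foldl (fun (pc : Int × Int) (i : Nat) =>
    (pc.1 * (i : Int), if pc.1 * (i : Int) ≤ n then pc.2 + 1 else pc.2)) pc

-- "m was marked composite": m has a divisor d with 2 ≤ d, d*d < N, 2d ≤ m ≤ N
def pvMarkAll (N m : Nat) : Prop := ∃ d, 2 ≤ d ∧ d * d < N ∧ d ∣ m ∧ 2 * d ≤ m ∧ m ≤ N

def pvFinalPr (N : Nat) : Nat → Bool :=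
  fun m => (((pvSieveLoop N (Array.replicate (N + 1) true) 2).setIfInBounds 0
      false).setIfInBounds 1 false).getD m false

-- array-access helpers for the proofs
theorem pvGetD_set (a : Array Bool) (j m : Nat) (v d : Bool) (hj : j < a.size) :
    (a.setIfInBounds j v).getD m d = if m = j then v else a.getD m d := by
  rw [Array.getD_eq_getD_getElem?, Array.getD_eq_getD_getElem?, Array.getElem?_setIfInBounds]
  by_cases hmj : m = j
  · subst hmj; rw [if_pos rfl, if_pos rfl, if_pos hj]; rfl
  · rw [if_neg (by omega : ¬ j = m), if_neg hmj]

theorem pvGetD_replicate (n m : Nat) (d : Bool) (h : m < n) :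
    (Array.replicate n true).getD m d = true := by
  rw [Array.getD_eq_getD_getElem?, Array.getElem?_replicate, if_pos h]; rfl

theorem pvMark_size (N i : Nat) :
    ∀ k j pr, N + 1 - j ≤ k → (pvMarkMultiples N i pr j).size = pr.size := by
  intro k
  induction k with
  | zero =>
    intro j pr hk
    rw [pvMarkMultiples, dif_neg (by omega : ¬ (0 < i ∧ j ≤ N))]
  | succ k ih =>
    intro j pr hk
    by_cases hg : 0 < i ∧ j ≤ N
    · rw [pvMarkMultiples, dif_pos hg, ih (j + i) _ (by omega), Array.size_setIfInBounds]
    · rw [pvMarkMultiples, dif_neg hg]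

theorem pvSieveLoop_size (N : Nat) :
    ∀ k i pr, N - i ≤ k → (pvSieveLoop N pr i).size = pr.size := by
  intro k
  induction k with
  | zero =>
    intro i pr hk
    have hii : ¬ i * i < N := by
      rcases Nat.eq_zero_or_pos i with h0 | h0
      · omega
      · have : i ≤ i * i := Nat.le_mul_of_pos_left i h0
        omega
    rw [pvSieveLoop, dif_neg hii]
  | succ k ih =>
    intro i pr hk
    by_cases hii : i * i < N
    · have hiN : i < N := by
        rcases Nat.eq_zero_or_pos i with h0 | h0
        · omega
        · have : i ≤ i * i := Nat.le_mul_of_pos_left i h0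
          omega
      rw [pvSieveLoop, dif_pos hii, ih (i + 1) _ (by omega)]
      by_cases hpi : pr.getD i false = true
      · rw [if_pos hpi, pvMark_size N i (N + 1) (i * 2) pr (by omega)]
      · rw [if_neg hpi]
    · rw [pvSieveLoop, dif_neg hii]

theorem pvMark_char (N i : Nat) (hi : 1 ≤ i) :
    ∀ k j pr m, N + 1 - j ≤ k → pr.size = N + 1 →
      ((pvMarkMultiples N i pr j).getD m false = false ↔
        (pr.getD m false = false ∨ ∃ t, m = j + t * i ∧ m ≤ N)) := by
  intro k
  induction k with
  | zero =>
    intro j pr m hk hsz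
    rw [pvMarkMultiples, dif_neg (by omega : ¬ (0 < i ∧ j ≤ N))]
    constructor
    · exact Or.inl
    · rintro (h | ⟨t, rfl, hle⟩)
      · exact h
      · omega
  | succ k ih =>
    intro j pr m hk hsz
    by_cases hj : j ≤ N
    · rw [pvMarkMultiples, dif_pos ⟨by omega, hj⟩,
        ih (j + i) _ m (by omega) (by rw [Array.size_setIfInBounds, hsz]),
        pvGetD_set pr j m false false (by omega)]
      constructor
      · rintro (h | ⟨t, rfl, hle⟩)
        · by_cases hmj : m = j
          · exact Or.inr ⟨0, by omega, by omega⟩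
          · rw [if_neg hmj] at h; exact Or.inl h
        · exact Or.inr ⟨t + 1, by ring, hle⟩
      · rintro (h | ⟨t, rfl, hle⟩)
        · by_cases hmj : m = j
          · left; rw [if_pos hmj]
          · left; rw [if_neg hmj]; exact h
        · cases t with
          | zero => left; simp
          | succ t => right; exact ⟨t, by ring, hle⟩
    · rw [pvMarkMultiples, dif_neg (by omega : ¬ (0 < i ∧ j ≤ N))]
      constructor
      · exact Or.inl
      · rintro (h | ⟨t, rfl, hle⟩)
        · exact h
        · omega

theorem pvSieveLoop_char (N : Nat) :
    ∀ k i pr, N - i ≤ k → 2 ≤ i → pr.size = N + 1 →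
      (∀ m, m ≤ N →
        (pr.getD m false = false ↔ ∃ d, 2 ≤ d ∧ d < i ∧ d * d < N ∧ d ∣ m ∧ 2 * d ≤ m ∧ m ≤ N)) →
      ∀ m, m ≤ N → ((pvSieveLoop N pr i).getD m false = false ↔ pvMarkAll N m) := by
  intro k
  induction k with
  | zero =>
    intro i pr hk h2 hsz hpr m hm
    have hii : ¬ i * i < N := by
      have : i ≤ i * i := Nat.le_mul_of_pos_left i (by omega)
      omega
    rw [pvSieveLoop, dif_neg hii, hpr m hm]
    constructor
    · rintro ⟨d, hd2, _, hdd, hrest⟩; exact ⟨d, hd2, hdd, hrest⟩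
    · rintro ⟨d, hd2, hdd, hrest⟩
      have hdle : d ≤ d * d := Nat.le_mul_of_pos_left d (by omega)
      exact ⟨d, hd2, by omega, hdd, hrest⟩
  | succ k ih =>
    intro i pr hk h2 hsz hpr m hm
    by_cases hii : i * i < N
    · have hiN : i < N := by
        have : i ≤ i * i := Nat.le_mul_of_pos_left i (by omega)
        omega
      rw [pvSieveLoop, dif_pos hii]
      by_cases hpi : pr.getD i false = true
      · rw [if_pos hpi]
        apply ih (i + 1) _ (by omega) (by omega)
          (by rw [pvMark_size N i (N + 1) (i * 2) pr (by omega)]; exact hsz) ?_ m hm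
        intro m' hm'
        rw [pvMark_char N i (by omega) (N + 1) (i * 2) pr m' (by omega) hsz, hpr m' hm']
        constructor
        · rintro (⟨d, hd2, hdi, hrest⟩ | ⟨t, rfl, hle⟩)
          · exact ⟨d, hd2, by omega, hrest⟩
          · refine ⟨i, h2, by omega, hii, ⟨t + 2, by ring⟩, ?_, hle⟩
            calc 2 * i = i * 2 := by ring
              _ ≤ i * 2 + t * i := Nat.le_add_right _ _
        · rintro ⟨d, hd2, hdi1, hdN, hdvd, h2d, hmN⟩
          by_cases hdi : d < i
          · exact Or.inl ⟨d, hd2, hdi, hdN, hdvd, h2d, hmN⟩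
          · have hde : d = i := by omega
            subst hde
            obtain ⟨s, rfl⟩ := hdvd
            right
            have hs : 2 ≤ s := by
              rcases s with _ | _ | s
              · omega
              · have : d * 1 = d := Nat.mul_one d
                omega
              · omega
            obtain ⟨u, rfl⟩ := Nat.exists_eq_add_of_le hs
            refine ⟨u, ?_, hmN⟩
            ring
      · rw [if_neg hpi]
        apply ih (i + 1) _ (by omega) (by omega) hsz ?_ m hm
        intro m' hm'
        rw [hpr m' hm']
        constructor
        · rintro ⟨d, hd2, hdi, hrest⟩; exact ⟨d, hd2, by omega, hrest⟩
        · rintro ⟨d, hd2, hdi1, hdN, hdvd, h2d, hmN⟩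
          by_cases hdi : d < i
          · exact ⟨d, hd2, hdi, hdN, hdvd, h2d, hmN⟩
          · have hde : d = i := by omega
            subst hde
            have hfalse : pr.getD d false = false := by
              cases hb : pr.getD d false
              · rfl
              · exact absurd hb hpi
            obtain ⟨d₀, h₀2, h₀i, h₀N, h₀dvd, h₀2d, _⟩ := (hpr d (by omega)).mp hfalse
            exact ⟨d₀, h₀2, by omega, h₀N, h₀dvd.trans hdvd, by omega, hmN⟩
    · rw [pvSieveLoop, dif_neg hii, hpr m hm]
      constructor
      · rintro ⟨d, hd2, _, hdd, hrest⟩; exact ⟨d, hd2, hdd, hrest⟩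
      · rintro ⟨d, hd2, hdd, hrest⟩
        refine ⟨d, hd2, ?_, hdd, hrest⟩
        by_contra hdi
        push Not at hdi
        have := Nat.mul_le_mul hdi hdi
        omega

theorem pvFinalPr_true (N m : Nat) (hN2 : 2 ≤ N) (hm : m ≤ N) :
    pvFinalPr N m = true ↔ (m ≠ 0 ∧ m ≠ 1 ∧ ¬ pvMarkAll N m) := by
  have hinv : ∀ m', m' ≤ N → ((Array.replicate (N + 1) true).getD m' false = false ↔
      ∃ d, 2 ≤ d ∧ d < 2 ∧ d * d < N ∧ d ∣ m' ∧ 2 * d ≤ m' ∧ m' ≤ N) := by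
    intro m' hm'
    rw [pvGetD_replicate (N + 1) m' false (by omega)]
    constructor
    · intro h; simp at h
    · rintro ⟨d, hd2, hdlt, -⟩; omega
  have hsz : (pvSieveLoop N (Array.replicate (N + 1) true) 2).size = N + 1 := by
    rw [pvSieveLoop_size N N 2 _ (by omega), Array.size_replicate]
  have hc := pvSieveLoop_char N N 2 (Array.replicate (N + 1) true) (by omega) (le_refl 2)
    (by rw [Array.size_replicate]) hinv m hm
  unfold pvFinalPr
  rw [pvGetD_set _ 1 m false false (by rw [Array.size_setIfInBounds]; omega),
    pvGetD_set _ 0 m false false (by omega)]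
  by_cases h0 : m = 0
  · subst h0; simp
  · by_cases h1 : m = 1
    · subst h1; simp
    · rw [if_neg h1, if_neg h0, ← Bool.not_eq_false, hc]
      tauto

theorem pvTd_char (m : Nat) :
    ∀ k d, m + 1 - d ≤ k →
      (pvIsPrimeLoop m d = false ↔ ∃ e, d ≤ e ∧ e * e ≤ m ∧ m % e = 0) := by
  intro k
  induction k with
  | zero =>
    intro d hk
    have hdm : ¬ d * d ≤ m := by
      have : d ≤ d * d := Nat.le_mul_of_pos_left d (by omega)
      omega
    rw [pvIsPrimeLoop, dif_neg hdm]
    constructor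
    · intro h; simp at h
    · rintro ⟨e, hde, hee, -⟩
      have := Nat.mul_le_mul hde hde
      exact absurd (this.trans hee) hdm
  | succ k ih =>
    intro d hk
    by_cases hdm : d * d ≤ m
    · rw [pvIsPrimeLoop, dif_pos hdm]
      by_cases hmd : m % d = 0
      · rw [if_pos hmd]
        simp only [true_iff]
        exact ⟨d, le_refl d, hdm, hmd⟩
      · rw [if_neg hmd, ih (d + 1) (by omega)]
        constructor
        · rintro ⟨e, hde, he⟩; exact ⟨e, by omega, he⟩
        · rintro ⟨e, hde, hee, hme⟩
          rcases Nat.eq_or_lt_of_le hde with he | he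
          · exact absurd (he ▸ hme) hmd
          · exact ⟨e, he, hee, hme⟩
    · rw [pvIsPrimeLoop, dif_neg hdm]
      constructor
      · intro h; simp at h
      · rintro ⟨e, hde, hee, -⟩
        have := Nat.mul_le_mul hde hde
        exact absurd (this.trans hee) hdm

theorem pvIsPrime_false (m : Nat) :
    pvIsPrime m = false ↔ ∃ e, 2 ≤ e ∧ e * e ≤ m ∧ e ∣ m := by
  unfold pvIsPrime
  rw [pvTd_char m (m + 1) 2 (by omega)]
  constructor
  · rintro ⟨e, he2, hee, hme⟩
    exact ⟨e, he2, hee, (Nat.dvd_iff_mod_eq_zero).mpr hme⟩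
  · rintro ⟨e, he2, hee, hdvd⟩
    exact ⟨e, he2, hee, (Nat.dvd_iff_mod_eq_zero).mp hdvd⟩

-- a trial-division prime has no divisor d with 2 ≤ d and 2d ≤ m at all
theorem pvPrime_noDiv (m : Nat) (hp : pvIsPrime m = true) :
    ¬ ∃ d, 2 ≤ d ∧ d ∣ m ∧ 2 * d ≤ m := by
  rintro ⟨d, hd2, hdvd, h2d⟩
  have hmd2 : 2 ≤ m / d := (Nat.le_div_iff_mul_le (by omega)).mpr (by omega)
  have h1 : pvIsPrime m = false := by
    rw [pvIsPrime_false]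
    refine ⟨min d (m / d), le_min hd2 hmd2, ?_, ?_⟩
    · calc min d (m / d) * min d (m / d) ≤ (m / d) * d :=
            Nat.mul_le_mul (min_le_right _ _) (min_le_left _ _)
        _ = m := Nat.div_mul_cancel hdvd
    · rcases le_total d (m / d) with h | h
      · rw [min_eq_left h]; exact hdvd
      · rw [min_eq_right h]; exact Nat.div_dvd_of_dvd hdvd
  rw [hp] at h1
  exact absurd h1 (by simp)

-- an unmarked trial-division composite in [2..N] must be N itself (and N ≥ 4)
theorem pvFake (N m : Nat) (h2 : 2 ≤ m) (hN : m ≤ N) (hc : pvIsPrime m = false)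
    (hu : ¬ pvMarkAll N m) : m = N ∧ 4 ≤ m := by
  obtain ⟨e, he2, hee, hedvd⟩ := (pvIsPrime_false m).mp hc
  have h2e : 2 * e ≤ m := (Nat.mul_le_mul_right e he2).trans hee
  have hnot : ¬ e * e < N := fun h => hu ⟨e, he2, h, hedvd, h2e, hN⟩
  have h4 : 4 ≤ e * e := by
    have := Nat.mul_le_mul he2 he2
    omega
  omega

theorem pvFinalPr_zero (N : Nat) (hN2 : 2 ≤ N) : pvFinalPr N 0 = false := by
  have hsz : (pvSieveLoop N (Array.replicate (N + 1) true) 2).size = N + 1 := by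
    rw [pvSieveLoop_size N N 2 _ (by omega), Array.size_replicate]
  unfold pvFinalPr
  rw [pvGetD_set _ 1 0 false false (by rw [Array.size_setIfInBounds]; omega),
    if_neg (by omega), pvGetD_set _ 0 0 false false (by omega), if_pos rfl]

theorem pvFinalPr_one (N : Nat) (hN2 : 2 ≤ N) : pvFinalPr N 1 = false := by
  have hsz : (pvSieveLoop N (Array.replicate (N + 1) true) 2).size = N + 1 := by
    rw [pvSieveLoop_size N N 2 _ (by omega), Array.size_replicate]
  unfold pvFinalPr
  rw [pvGetD_set _ 1 1 false false (by rw [Array.size_setIfInBounds]; omega), if_pos rfl]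

theorem pvFinalPr_eq_isPrime (N m : Nat) (h2 : 2 ≤ m) (hlt : m < N) :
    pvFinalPr N m = pvIsPrime m := by
  cases hb : pvIsPrime m with
  | false =>
    cases hf : pvFinalPr N m with
    | false => rfl
    | true =>
      exfalso
      obtain ⟨-, -, hu⟩ := (pvFinalPr_true N m (by omega) (by omega)).mp hf
      have := pvFake N m h2 (by omega) hb hu
      omega
  | true =>
    rw [(pvFinalPr_true N m (by omega) (by omega)).mpr ⟨by omega, by omega, ?_⟩]
    rintro ⟨d, hd2, -, hdvd, h2d, -⟩
    exact pvPrime_noDiv m hb ⟨d, hd2, hdvd, h2d⟩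

theorem pvFoldl_filter (p : Nat → Bool) :
    ∀ (l : List Nat) (acc : List Nat),
      l.foldl (fun acc i => if p i = true then acc ++ [i] else acc) acc = acc ++ l.filter p := by
  intro l
  induction l with
  | nil => intro acc; simp
  | cons x l ih =>
    intro acc
    rw [List.foldl_cons, List.filter_cons]
    cases hx : p x with
    | false => rw [if_neg (by simp)]; simpa using ih acc
    | true =>
      rw [if_pos rfl]
      rw [ih (acc ++ [x])]
      simp

theorem pvSieve_eq_filter (N : Nat) : pvSieve N = (List.range (N + 1)).filter (pvFinalPr N) := by
  show (List.range (N + 1)).foldl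
      (fun acc i => if pvFinalPr N i = true then acc ++ [i] else acc) [] = _
  rw [pvFoldl_filter (pvFinalPr N) (List.range (N + 1)) []]
  rfl

theorem pvCF_stuck (n : Int) :
    ∀ (xs : List Nat) (pc : Int × Int), n < pc.1 → 0 < pc.1 → (∀ m ∈ xs, 1 ≤ m) →
      (pvCF n xs pc).2 = pc.2 := by
  intro xs
  induction xs with
  | nil => intro pc _ _ _; rfl
  | cons x xs ih =>
    intro pc hgt hpos hall
    have hx : (1 : Int) ≤ (x : Int) := by exact_mod_cast hall x (List.mem_cons_self ..)
    have h1 : pc.1 ≤ pc.1 * (x : Int) := le_mul_of_one_le_right (le_of_lt hpos) hx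
    simp only [pvCF, List.foldl_cons]
    rw [if_neg (by omega)]
    exact ih (pc.1 * (x : Int), pc.2) (by omega) (by omega)
      (fun m hm => hall m (List.mem_cons_of_mem x hm))

theorem pvCF_fst_ge (n : Int) :
    ∀ (xs : List Nat) (pc : Int × Int), 0 ≤ pc.1 → (∀ m ∈ xs, 1 ≤ m) →
      pc.1 ≤ (pvCF n xs pc).1 := by
  intro xs
  induction xs with
  | nil => intro pc _ _; exact le_refl _
  | cons x xs ih =>
    intro pc hpos hall
    have hx : (1 : Int) ≤ (x : Int) := by exact_mod_cast hall x (List.mem_cons_self ..)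
    have h1 : pc.1 ≤ pc.1 * (x : Int) := le_mul_of_one_le_right hpos hx
    simp only [pvCF, List.foldl_cons]
    refine h1.trans ?_
    exact ih (pc.1 * (x : Int), if pc.1 * (x : Int) ≤ n then pc.2 + 1 else pc.2)
      (by omega) (fun m hm => hall m (List.mem_cons_of_mem x hm))

theorem pvCF_append (n : Int) (xs ys : List Nat) (pc : Int × Int) :
    pvCF n (xs ++ ys) pc = pvCF n ys (pvCF n xs pc) := by
  simp [pvCF, List.foldl_append]

theorem pvCF_fst_two (n : Int) :
    ∀ (xs : List Nat) (pc : Int × Int), 1 ≤ pc.1 → (∀ m ∈ xs, 1 ≤ m) → 2 ∈ xs →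
      2 ≤ (pvCF n xs pc).1 := by
  intro xs
  induction xs with
  | nil => intro pc _ _ h2; simp at h2
  | cons x xs ih =>
    intro pc hpos hall h2
    have hx : (1 : Int) ≤ (x : Int) := by exact_mod_cast hall x (List.mem_cons_self ..)
    have h1 : pc.1 ≤ pc.1 * (x : Int) := le_mul_of_one_le_right (by omega) hx
    simp only [pvCF, List.foldl_cons]
    rcases List.mem_cons.mp h2 with h2x | h2xs
    · have hx2 : (2 : Int) ≤ (x : Int) := by exact_mod_cast h2x.le
      have hp2 : (2 : Int) ≤ pc.1 * (x : Int) := by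
        calc (2 : Int) ≤ (x : Int) := hx2
          _ = 1 * (x : Int) := (one_mul _).symm
          _ ≤ pc.1 * (x : Int) := by
              exact mul_le_mul_of_nonneg_right hpos (by omega)
      refine hp2.trans ?_
      exact pvCF_fst_ge n xs _ (by omega)
        (fun m hm => hall m (List.mem_cons_of_mem x hm))
    · exact ih (pc.1 * (x : Int), if pc.1 * (x : Int) ≤ n then pc.2 + 1 else pc.2)
        (by omega) (fun m hm => hall m (List.mem_cons_of_mem x hm)) h2xs

theorem pvBLoop_eq_cf (n : Int) (N : Nat) :
    ∀ k p prod count, N + 1 - p ≤ k → 2 ≤ p → 1 ≤ prod →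
      pvBLoop n N p prod count
        = (pvCF n ((List.range' p (N + 1 - p)).filter pvIsPrime) (prod, count)).2 := by
  intro k
  induction k with
  | zero =>
    intro p prod count hk h2p hprod
    rw [pvBLoop, dif_neg (by omega), (by omega : N + 1 - p = 0)]
    rfl
  | succ k ih =>
    intro p prod count hk h2p hprod
    by_cases hp : p ≤ N
    · rw [pvBLoop, dif_pos hp, (by omega : N + 1 - p = (N - p) + 1), List.range'_succ]
      have hpI : (2 : Int) ≤ (p : Int) := by exact_mod_cast h2p
      cases hpp : pvIsPrime p with
      | true =>
        rw [if_pos rfl, List.filter_cons_of_pos hpp]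
        by_cases hbr : prod * (p : Int) > n
        · rw [if_pos hbr]
          simp only [pvCF, List.foldl_cons]
          rw [if_neg (by omega)]
          refine (pvCF_stuck n ((List.range' (p + 1) (N - p)).filter pvIsPrime)
            (prod * (p : Int), count) (by omega) (by nlinarith) ?_).symm
          intro m hm
          have := (List.mem_range'_1.mp (List.mem_filter.mp hm).1).1
          omega
        · rw [if_neg hbr,
            ih (p + 1) (prod * (p : Int)) (count + 1) (by omega) (by omega) (by nlinarith),
            (by omega : N + 1 - (p + 1) = N - p)]
          simp only [pvCF, List.foldl_cons]
          rw [if_pos (by omega)]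
      | false =>
        rw [if_neg (by simp), List.filter_cons_of_neg (by simp [hpp]),
          ih (p + 1) prod count (by omega) (by omega) hprod,
          (by omega : N + 1 - (p + 1) = N - p)]
    · rw [pvBLoop, dif_neg hp, (by omega : N + 1 - p = 0)]
      rfl

-- ===== VERDICT (by name: the statement is the Claim_ definition above) =====
theorem maxPrimefactorNumProductGatterthenN_spec : Claim_equal_maxPrimefactorNumProductGatterthenN := by
  intro n _
  unfold Spec_maxPrimefactorNumProductGatterthenN
    maxPrimefactorNumProductGatterthenN maxPrimefactorNumProductGatterthenN_alt
  by_cases hn : n < 2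
  · rw [if_pos hn, if_pos hn]
  · rw [if_neg hn, if_neg hn]
    have hn2 : 2 ≤ n := by omega
    have hNn : ((n.toNat : Int)) = n := Int.toNat_of_nonneg (by omega)
    set N := n.toNat with hNdef
    have hN2 : 2 ≤ N := by omega
    show (pvCF n (pvSieve N) (1, 0)).2 = pvBLoop n N 2 1 0
    rw [pvBLoop_eq_cf n N (N + 1) 2 1 0 (by omega) (le_refl 2) (by omega),
      (by omega : N + 1 - 2 = N - 1), pvSieve_eq_filter]
    have hsplit : List.range (N + 1) = 0 :: 1 :: List.range' 2 (N - 1) := by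
      rw [List.range_eq_range', (by omega : N + 1 = ((N - 1) + 1) + 1),
        List.range'_succ, List.range'_succ]
    have hconc : List.range' 2 (N - 1) = List.range' 2 (N - 2) ++ [N] := by
      rw [(by omega : N - 1 = (N - 2) + 1), List.range'_concat]
      have h2 : 2 + 1 * (N - 2) = N := by omega
      rw [h2]
    have hpref : (List.range' 2 (N - 2)).filter (pvFinalPr N)
        = (List.range' 2 (N - 2)).filter pvIsPrime := by
      apply List.filter_congr
      intro m hm
      have := List.mem_range'_1.mp hm
      exact pvFinalPr_eq_isPrime N m (by omega) (by omega)
    rw [hsplit, List.filter_cons_of_neg (by simp [pvFinalPr_zero N hN2]),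
      List.filter_cons_of_neg (by simp [pvFinalPr_one N hN2]), hconc,
      List.filter_append, List.filter_append, hpref]
    have hFel : ∀ m ∈ (List.range' 2 (N - 2)).filter pvIsPrime, 2 ≤ m :=
      fun m hm => (List.mem_range'_1.mp (List.mem_filter.mp hm).1).1
    cases hPN : pvIsPrime N with
    | true =>
      have hFPN : pvFinalPr N N = true := by
        rw [pvFinalPr_true N N hN2 (le_refl N)]
        refine ⟨by omega, by omega, ?_⟩
        rintro ⟨d, hd2, -, hdvd, h2d, -⟩
        exact pvPrime_noDiv N hPN ⟨d, hd2, hdvd, h2d⟩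
      rw [List.filter_singleton, List.filter_singleton, hFPN, hPN]
    | false =>
      cases hFN : pvFinalPr N N with
      | false => rw [List.filter_singleton, List.filter_singleton, hFN, hPN]
      | true =>
        have hu : ¬ pvMarkAll N N := ((pvFinalPr_true N N hN2 (le_refl N)).mp hFN).2.2
        have hN4 : 4 ≤ N := (pvFake N N (by omega) (le_refl N) hPN hu).2
        rw [List.filter_singleton, List.filter_singleton, hFN, hPN]
        simp only [cond_true, cond_false, List.append_nil]
        set F := (List.range' 2 (N - 2)).filter pvIsPrime with hF
        have h2F : 2 ∈ F := by
          rw [hF, List.mem_filter]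
          refine ⟨List.mem_range'_1.mpr ⟨le_refl 2, by omega⟩, ?_⟩
        -- pvIsPrime 2 = true, via the characterisation
          cases hb : pvIsPrime 2 with
          | true => rfl
          | false =>
            exfalso
            obtain ⟨e, he2, hee, -⟩ := (pvIsPrime_false 2).mp hb
            have := Nat.mul_le_mul he2 he2
            omega
        have hP2 : (2 : Int) ≤ (pvCF n F (1, 0)).1 :=
          pvCF_fst_two n F (1, 0) (by norm_num) (fun m hm => by have := hFel m hm; omega) h2F
        rw [pvCF_append]
        have hsing : pvCF n [N] (pvCF n F (1, 0))
            = ((pvCF n F (1, 0)).1 * (N : Int),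
               if (pvCF n F (1, 0)).1 * (N : Int) ≤ n then (pvCF n F (1, 0)).2 + 1
               else (pvCF n F (1, 0)).2) := rfl
        rw [hsing, if_neg ?hlast]
        case hlast =>
          have hNI : (2 : Int) ≤ (N : Int) := by exact_mod_cast hN2
          have hmul : (2 : Int) * (N : Int) ≤ (pvCF n F (1, 0)).1 * (N : Int) :=
            mul_le_mul_of_nonneg_right hP2 (by omega)
          omega
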